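-- pv_equiv track=rewrite | github.com/raghujayan/openvds-mcp-server | src/data_integrity.py | _get_overall_severity
-- ===== SOURCE A (Python) =====
-- from typing import Dict, Any, List, Optional, Tuple
--
-- def _get_overall_severity(failed_checks: List[Dict]) -> str:
--     """Determine overall severity from failed checks"""
--     if not failed_checks:
--         return "none"
--
--     severities = [c.get('severity', 'medium') for c in failed_checks]
--
--     if 'critical' in severities:
--         return 'critical'
--     elif 'high' in severities:
--         return 'high'
--     elif 'medium' in severities:
--         return 'medium'
--     else:
--         return 'low'
-- ===== SOURCE B (Python) =====
-- def _get_overall_severity(failed_checks):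
--     """Determine overall severity from failed checks"""
--     if not failed_checks:
--         return "none"
--     rank = {'critical': 4, 'high': 3, 'medium': 2, 'low': 1}
--     best = max(rank.get(c.get('severity', 'medium'), 1) for c in failed_checks)
--     return {4: 'critical', 3: 'high', 2: 'medium', 1: 'low'}[best]
-- ===== Notes on version B (the rewrite author's own statement) =====
-- stated objective: simpler
-- what changed: Replaces the priority chain of up-to-three membership scans over the severities list with a single pass computing the maximum numeric rank (unknown severities rank 1, like A's final else) and mapping the rank back to its name.
import Mathlib
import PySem

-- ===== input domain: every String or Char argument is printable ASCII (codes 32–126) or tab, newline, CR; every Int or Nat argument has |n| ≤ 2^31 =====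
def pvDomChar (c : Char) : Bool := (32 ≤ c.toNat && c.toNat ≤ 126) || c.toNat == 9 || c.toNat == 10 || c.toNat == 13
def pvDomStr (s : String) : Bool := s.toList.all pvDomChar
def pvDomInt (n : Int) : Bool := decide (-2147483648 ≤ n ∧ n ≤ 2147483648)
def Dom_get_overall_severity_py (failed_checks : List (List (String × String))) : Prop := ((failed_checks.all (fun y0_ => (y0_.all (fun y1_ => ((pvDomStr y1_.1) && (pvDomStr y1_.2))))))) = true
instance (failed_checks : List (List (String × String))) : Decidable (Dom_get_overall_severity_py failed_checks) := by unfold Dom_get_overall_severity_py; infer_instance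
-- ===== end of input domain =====

-- B computes the max severity rank in one pass instead of A's priority membership chain; objective: simpler.
-- ===== PORT A =====
def get_overall_severity_py (failed_checks : List (List (String × String))) : String :=
  if failed_checks = [] then "none"
  else
    let severities := failed_checks.map (fun c => (PySem.Dict.mk c).getD "severity" "medium")
    if severities.contains "critical" then "critical"
    else if severities.contains "high" then "high"
    else if severities.contains "medium" then "medium"
    else "low"

-- ===== PORT B =====
-- rank.get(sev, 1)
def pvRank (s : String) : Nat :=
  if s = "critical" then 4 else if s = "high" then 3 else if s = "medium" then 2 else 1

-- {4:'critical',3:'high',2:'medium',1:'low'}[best]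
def pvUnrank (n : Nat) : String :=
  if n = 4 then "critical" else if n = 3 then "high" else if n = 2 then "medium" else "low"

def get_overall_severity_py_alt (failed_checks : List (List (String × String))) : String :=
  if failed_checks = [] then "none"
  else
    pvUnrank ((failed_checks.map
      (fun c => pvRank ((PySem.Dict.mk c).getD "severity" "medium"))).foldl max 0)

-- ===== PRECONDITION & SPEC =====
def Spec_get_overall_severity_py (failed_checks : List (List (String × String))) (out : String) : Prop := out = get_overall_severity_py_alt failed_checks
instance (failed_checks : List (List (String × String))) (out : String) : Decidable (Spec_get_overall_severity_py failed_checks out) := by unfold Spec_get_overall_severity_py; infer_instance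

-- ===== CLAIM (what is proved, stated in full; the proofs are below) =====
def Claim_equal_get_overall_severity_py : Prop := ∀ (failed_checks : List (List (String × String))), Dom_get_overall_severity_py failed_checks → Spec_get_overall_severity_py failed_checks (get_overall_severity_py failed_checks)

-- ===== LEMMAS AND PROOFS =====

-- recursive form of B's fold, used only in the proofs
def pvM : List String → Nat
  | [] => 0
  | s :: t => max (pvRank s) (pvM t)

theorem pvM_le (l : List String) : pvM l ≤ 4 := by
  induction l with
  | nil => simp [pvM]
  | cons s t ih => simp [pvM, pvRank]; split_ifs <;> omega

theorem foldl_max_eq_pvM (l : List String) (a : Nat) :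
    (l.map pvRank).foldl max a = max a (pvM l) := by
  induction l generalizing a with
  | nil => simp [pvM]
  | cons s t ih => simp [pvM, ih, Nat.max_comm, Nat.max_left_comm]

theorem pvM_eq_four (l : List String) : pvM l = 4 ↔ "critical" ∈ l := by
  induction l with
  | nil => simp [pvM]
  | cons s t ih =>
    have ht := pvM_le t
    by_cases hs : s = "critical"
    · simp [pvM, pvRank, hs]; omega
    · have hs' : "critical" ≠ s := fun h => hs h.symm
      simp [pvM, pvRank, hs, hs']
      rw [← ih]; split_ifs <;> omega

theorem pvM_ge_three (l : List String) : 3 ≤ pvM l ↔ ("critical" ∈ l ∨ "high" ∈ l) := by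
  induction l with
  | nil => simp [pvM]
  | cons s t ih =>
    have ht := pvM_le t
    by_cases h1 : s = "critical" <;> by_cases h2 : s = "high" <;>
      [skip; skip; skip;
       (have h1' : "critical" ≠ s := fun h => h1 h.symm
        have h2' : "high" ≠ s := fun h => h2 h.symm
        simp [pvM, pvRank, h1, h2, h1', h2']
        rw [← ih]; split_ifs <;> omega)] <;>
      simp [pvM, pvRank, h1, h2]

theorem pvM_ge_two (l : List String) :
    2 ≤ pvM l ↔ ("critical" ∈ l ∨ "high" ∈ l ∨ "medium" ∈ l) := by
  induction l with
  | nil => simp [pvM]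
  | cons s t ih =>
    have ht := pvM_le t
    by_cases h1 : s = "critical"
    · simp [pvM, pvRank, h1]
    · by_cases h2 : s = "high"
      · simp [pvM, pvRank, h2]
      · by_cases h3 : s = "medium"
        · simp [pvM, pvRank, h3]
        · have h1' : "critical" ≠ s := fun h => h1 h.symm
          have h2' : "high" ≠ s := fun h => h2 h.symm
          have h3' : "medium" ≠ s := fun h => h3 h.symm
          simp [pvM, pvRank, h1, h2, h3, h1', h2', h3']
          rw [← ih]

-- ===== VERDICT (by name: the statement is the Claim_ definition above) =====
theorem get_overall_severity_py_spec : Claim_equal_get_overall_severity_py := by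
  intro fc _
  unfold Spec_get_overall_severity_py get_overall_severity_py get_overall_severity_py_alt
  by_cases hfc : fc = []
  · simp [hfc]
  · simp only [hfc, if_false]
    rw [show (List.map (fun c => pvRank ((PySem.Dict.mk c).getD "severity" "medium")) fc)
          = List.map pvRank (List.map (fun c => (PySem.Dict.mk c).getD "severity" "medium") fc) by
        rw [List.map_map]; rfl,
        foldl_max_eq_pvM, Nat.zero_max]
    generalize (List.map (fun c => (PySem.Dict.mk c).getD "severity" "medium") fc) = l
    have h4 := pvM_eq_four l
    have h3 := pvM_ge_three l
    have h2 := pvM_ge_two l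
    have hle := pvM_le l
    by_cases c1 : "critical" ∈ l
    · simp [c1, h4.mpr c1, pvUnrank]
    · by_cases c2 : "high" ∈ l
      · have hv : pvM l = 3 := by
          have ha := h3.mpr (Or.inr c2)
          rw [← h4] at c1
          omega
        simp [c1, c2, hv, pvUnrank]
      · by_cases c3 : "medium" ∈ l
        · have hv : pvM l = 2 := by
            have ha := h2.mpr (Or.inr (Or.inr c3))
            have hb : ¬ 3 ≤ pvM l := by rw [h3]; tauto
            omega
          simp [c1, c2, c3, hv, pvUnrank]
        · have hv : pvM l ≤ 1 := by
            have : ¬ 2 ≤ pvM l := by rw [h2]; tauto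
            omega
          simp [c1, c2, c3, pvUnrank]
          split_ifs <;> first | rfl | omega
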